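-- pv_equiv track=rewrite | github.com/jasminapegan/antonym_detection | data/slohun.py | word_list_to_dict
-- ===== SOURCE A (Python) =====
-- def word_list_to_dict(list):
--     list.sort(key=lambda x: x[0])
--
--     words_dict = {}
--     for line in list:
--
--         word = line[0]
--         indicator = line[-1]
--
--         if word in words_dict.keys():
--             words_dict[word].append(indicator)
--         else:
--             words_dict[word] = [indicator]
--
--     return words_dict
-- ===== SOURCE B (Python) =====
-- def word_list_to_dict(list):
--     # NOTE: like A, sorts `list` in place; raises IndexError if any inner list is empty.
--     list.sort(key=lambda x: x[0])
--     # equal first-elements are now adjacent: scan runs with two indices, no dict lookups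
--     result = {}
--     i, n = 0, len(list)
--     while i < n:
--         word = list[i][0]
--         j = i
--         while j < n and list[j][0] == word:
--             j += 1
--         result[word] = [line[-1] for line in list[i:j]]
--         i = j
--     return result
-- ===== Notes on version B (the rewrite author's own statement) =====
-- stated objective: alternative
-- what changed: After the (kept, in-place) sort, B groups adjacent equal-key runs with a two-pointer scan and builds each indicator list in one slice, instead of A's per-line dict membership test and append.
import Mathlib
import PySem

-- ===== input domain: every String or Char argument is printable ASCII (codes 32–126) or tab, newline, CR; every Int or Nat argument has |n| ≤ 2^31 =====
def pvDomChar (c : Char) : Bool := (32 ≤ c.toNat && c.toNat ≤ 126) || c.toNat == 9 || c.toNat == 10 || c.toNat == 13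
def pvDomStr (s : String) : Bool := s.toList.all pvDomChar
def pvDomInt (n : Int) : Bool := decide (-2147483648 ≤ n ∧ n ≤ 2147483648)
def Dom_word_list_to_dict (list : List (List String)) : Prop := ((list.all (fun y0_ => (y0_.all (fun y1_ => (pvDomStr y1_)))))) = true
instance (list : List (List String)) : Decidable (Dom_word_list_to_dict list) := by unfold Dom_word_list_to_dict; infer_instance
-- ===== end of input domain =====

-- B replaces A's per-line dict membership/append loop by a run scan over the sorted list; both Pythons
-- sort the argument in place (same mutation); the equivalence proved is about the return value.
-- x[0] / x[-1]: under Pre_ every inner list is nonempty, so the .getD "" default is never used.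
def pvKey (l : List String) : String := (PySem.List.pyGet? l 0).getD ""
def pvLast (l : List String) : String := (PySem.List.pyGet? l (-1)).getD ""

-- ===== PORT A =====
def word_list_to_dict (list : List (List String)) : List (String × List String) :=
  (PySem.List.sorted list pvKey false |>.foldl
    (fun words_dict line =>
      if words_dict.contains (pvKey line) then
        words_dict.modify (pvKey line) [] (fun v => v ++ [pvLast line])
      else
        words_dict.insert (pvKey line) [pvLast line])
    PySem.Dict.empty).items

-- ===== PORT B =====
-- B's while loops over indices i..j: outer loop = structural recursion on the remaining suffix,
-- inner `while list[j][0] == word` scan = takeWhile/dropWhile on that suffix.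
def pvGroupRuns : List (List String) → List (String × List String)
  | [] => []
  | l :: ls =>
      (pvKey l, pvLast l :: (ls.takeWhile (fun x => pvKey x == pvKey l)).map pvLast)
        :: pvGroupRuns (ls.dropWhile (fun x => pvKey x == pvKey l))
termination_by l => l.length
decreasing_by
  exact Nat.lt_succ_of_le (List.length_dropWhile_le _ _)

def word_list_to_dict_alt (list : List (List String)) : List (String × List String) :=
  pvGroupRuns (PySem.List.sorted list pvKey false)

-- ===== PRECONDITION & SPEC =====
-- Pre_ excludes exactly the inputs containing an empty inner list, on which A's `x[0]` raises IndexError.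
def Pre_word_list_to_dict (list : List (List String)) : Prop := ∀ l ∈ list, l ≠ []
instance (list : List (List String)) : Decidable (Pre_word_list_to_dict list) := by unfold Pre_word_list_to_dict; infer_instance
def pvWitness_word_list_to_dict : List (List String) := [["a", "x"], ["b", "y"], ["a", "z"]]

def Spec_word_list_to_dict (list : List (List String)) (out : List (String × List String)) : Prop := out = word_list_to_dict_alt list
instance (list : List (List String)) (out : List (String × List String)) : Decidable (Spec_word_list_to_dict list out) := by unfold Spec_word_list_to_dict; infer_instance

-- ===== CLAIM (what is proved, stated in full; the proofs are below) =====
def Claim_equal_word_list_to_dict : Prop := ∀ (list : List (List String)), Dom_word_list_to_dict list → Pre_word_list_to_dict list → Spec_word_list_to_dict list (word_list_to_dict list)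

-- ===== LEMMAS AND PROOFS =====


-- canonical form both sides are reduced to
def pvCanon (s : List (List String)) : List (String × List String) :=
  (PySem.List.dedup (s.map pvKey)).map
    (fun k => (k, (s.filter (fun l => pvKey l == k)).map pvLast))

-- A's if/else step is Python's d[w] = d.get(w, []) + [ind] in both branches
theorem pv_step_eq (d : PySem.Dict String (List String)) (line : List String) :
    (if d.contains (pvKey line) then d.modify (pvKey line) [] (fun v => v ++ [pvLast line])
     else d.insert (pvKey line) [pvLast line])
    = d.modify (pvKey line) [] (fun v => v ++ [pvLast line]) := by
  by_cases h : d.contains (pvKey line) = true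
  · simp [h]
  · have h' : d.get? (pvKey line) = none :=
      (PySem.Dict.get?_eq_none_iff_contains _ _).2 (by simpa using h)
    simp [h, PySem.Dict.modify, PySem.Dict.getD, h']

theorem pv_items_eq (d : PySem.Dict String (List String)) (h : d.keys.Nodup) :
    d.items = d.keys.map (fun k => (k, d.getD k [])) := by
  obtain ⟨ps⟩ := d
  induction ps with
  | nil => simp [PySem.Dict.keys]
  | cons p rest ih =>
    obtain ⟨k, v⟩ := p
    rw [PySem.Dict.keys_mk] at h ⊢
    simp only [List.map_cons] at h ⊢
    refine congrArg₂ List.cons ?_ ?_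
    · simp [PySem.Dict.getD, PySem.Dict.get?_mk_cons]
    · have hk : k ∉ rest.map (fun x => x.1) := (List.nodup_cons.mp h).1
      have htail := (List.nodup_cons.mp h).2
      refine Eq.trans (ih htail) ?_
      rw [PySem.Dict.keys_mk]
      refine List.map_congr_left ?_
      intro x hx
      have hxk : ¬ (k == x) = true := by
        simp only [beq_iff_eq]
        rintro rfl; exact hk hx
      simp [PySem.Dict.getD, PySem.Dict.get?_mk_cons, hxk]

theorem pv_fold_eq_canon (s : List (List String)) :
    (s.foldl
      (fun words_dict line =>
        if words_dict.contains (pvKey line) then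
          words_dict.modify (pvKey line) [] (fun v => v ++ [pvLast line])
        else
          words_dict.insert (pvKey line) [pvLast line])
      PySem.Dict.empty).items = pvCanon s := by
  simp only [pv_step_eq]
  have hkeys : (s.foldl (fun d line => d.modify (pvKey line) [] (fun v => v ++ [pvLast line]))
      PySem.Dict.empty).keys = PySem.List.dedup (s.map pvKey) := by
    have h := PySem.Dict.keys_foldl_modify_key (ν := List String) s pvKey []
      (fun _ line v => v ++ [pvLast line]) PySem.Dict.empty
    simpa [PySem.List.dedup_eq_ofList, PySem.Set.ofList_eq_foldl, PySem.Set.update,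
      PySem.Dict.empty, PySem.Dict.keys] using h
  have hnodup : (s.foldl (fun d line => d.modify (pvKey line) [] (fun v => v ++ [pvLast line]))
      PySem.Dict.empty).keys.Nodup := by
    have h := PySem.Dict.nodup_keys_foldl_modify_key (ν := List String) s pvKey []
      (fun _ line v => v ++ [pvLast line]) PySem.Dict.empty
      (by simp [PySem.Dict.empty, PySem.Dict.keys])
    exact h
  have hget : ∀ c, (s.foldl (fun d line => d.modify (pvKey line) [] (fun v => v ++ [pvLast line]))
      PySem.Dict.empty).getD c [] = (s.filter (fun l => pvKey l == c)).map pvLast := by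
    intro c
    have h1 : (s.foldl (fun d line => d.modify (pvKey line) [] (fun v => v ++ [pvLast line]))
        PySem.Dict.empty)
        = ((s.map (fun l => (pvKey l, pvLast l))).foldl
            (fun d p => d.modify p.1 [] (fun v => v ++ [p.2])) PySem.Dict.empty) := by
      rw [List.foldl_map]
    rw [h1, PySem.Dict.getD_foldl_modify_append]
    simp [List.filter_map, List.map_map, Function.comp_def, PySem.Dict.getD, PySem.Dict.get?,
      PySem.Dict.empty]
  rw [pv_items_eq _ hnodup, hkeys]
  exact List.map_congr_left (fun k _ => by rw [hget k])

-- dedup of a sorted key run: the leading key w absorbs its whole run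
theorem pv_add_prefix (w : String) (b : List String) (hb : ∀ k ∈ b, k ≠ w) :
    ∀ s : List String, List.foldl PySem.Set.add (w :: s) b = w :: List.foldl PySem.Set.add s b := by
  induction b with
  | nil => intro s; rfl
  | cons x xs ih =>
    intro s
    have hx : x ≠ w := hb x (by simp)
    have h1 : PySem.Set.add (w :: s) x = w :: PySem.Set.add s x := by
      have hwx : ((x : String) == w) = false := by simpa using hx
      simp only [PySem.Set.add, PySem.Set.contains, List.contains_cons, hwx, Bool.false_or]
      split <;> rfl
    rw [List.foldl_cons, List.foldl_cons, h1]
    exact ih (fun k hk => hb k (by simp [hk])) _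

theorem pv_run_absorb (w : String) (a : List String) (ha : ∀ k ∈ a, k = w) :
    List.foldl PySem.Set.add [w] a = [w] := by
  induction a with
  | nil => rfl
  | cons x xs ih =>
    have hx : x = w := ha x (by simp)
    subst hx
    have : PySem.Set.add [x] x = [x] := by
      simp [PySem.Set.add, PySem.Set.contains]
    rw [List.foldl_cons, this]
    exact ih (fun k hk => ha k (by simp [hk]))

theorem pv_dedup_run (w : String) (a b : List String) (ha : ∀ k ∈ a, k = w)
    (hb : ∀ k ∈ b, k ≠ w) :
    PySem.List.dedup (w :: (a ++ b)) = w :: PySem.List.dedup b := by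
  rw [PySem.List.dedup_eq_ofList, PySem.List.dedup_eq_ofList,
    PySem.Set.ofList_eq_foldl, PySem.Set.ofList_eq_foldl]
  have h0 : PySem.Set.add ([] : PySem.Set String) w = [w] := by
    simp [PySem.Set.add, PySem.Set.contains]
  rw [List.foldl_cons, h0, List.foldl_append, pv_run_absorb w a ha]
  exact pv_add_prefix w b hb []

theorem pv_groups_eq_canon (s : List (List String))
    (hs : (s.map pvKey).Pairwise (· ≤ ·)) : pvGroupRuns s = pvCanon s := by
  induction s using pvGroupRuns.induct with
  | case1 => simp [pvGroupRuns, pvCanon, PySem.List.dedup_eq_ofList, PySem.Set.ofList_eq_foldl]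
  | case2 l ls ih =>
    simp only [List.map_cons, List.pairwise_cons] at hs
    obtain ⟨hw, htail⟩ := hs
    have hw' : ∀ x ∈ ls, pvKey l ≤ pvKey x := by
      intro x hx; exact hw _ (List.mem_map_of_mem hx)
    set w := pvKey l with hwdef
    set P : List String → Bool := fun x => pvKey x == w with hP
    have hsplit : ls.takeWhile P ++ ls.dropWhile P = ls := List.takeWhile_append_dropWhile
    have hrun : ∀ x ∈ ls.takeWhile P, pvKey x = w := by
      intro x hx
      have := List.mem_takeWhile_imp hx
      simpa [hP] using this
    have hrest : ∀ x ∈ ls.dropWhile P, pvKey x ≠ w := by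
      intro x hx
      cases hre : ls.dropWhile P with
      | nil => rw [hre] at hx; simp at hx
      | cons r0 rs =>
        have hr0 : pvKey r0 ≠ w := by
          have hne : ls.dropWhile P ≠ [] := by rw [hre]; simp
          have hh := List.head_dropWhile_not P hne
          have h2 : (ls.dropWhile P).head hne = r0 := by
            have h3 := List.head?_eq_some_head (l := ls.dropWhile P) hne
            have h4 : (ls.dropWhile P).head? = some r0 := by rw [hre]; rfl
            exact Option.some.inj (h3.symm.trans h4)
          rw [h2] at hh
          simpa [hP] using hh
        have hr0mem : r0 ∈ ls := (List.dropWhile_sublist P).mem (by rw [hre]; simp)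
        have hr0gt : w < pvKey r0 := lt_of_le_of_ne (hw' r0 hr0mem) (Ne.symm hr0)
        rw [hre] at hx
        rcases List.mem_cons.mp hx with rfl | hx'
        · exact hr0
        · have hsub : ((ls.dropWhile P).map pvKey).Sublist (ls.map pvKey) :=
            (List.dropWhile_sublist P).map pvKey
          have hpw : ((ls.dropWhile P).map pvKey).Pairwise (· ≤ ·) := htail.sublist hsub
          rw [hre] at hpw
          simp only [List.map_cons, List.pairwise_cons] at hpw
          have : pvKey r0 ≤ pvKey x := hpw.1 _ (List.mem_map_of_mem hx')
          exact fun hxw => absurd (hxw ▸ this) (not_le.mpr hr0gt)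
    have hrest_pw : ((ls.dropWhile P).map pvKey).Pairwise (· ≤ ·) :=
      htail.sublist ((List.dropWhile_sublist P).map pvKey)
    rw [pvGroupRuns]
    rw [ih hrest_pw]
    unfold pvCanon
    have hmap : (l :: ls).map pvKey = w :: ((ls.takeWhile P).map pvKey ++ (ls.dropWhile P).map pvKey) := by
      rw [List.map_cons, ← hwdef, ← List.map_append, hsplit]
    rw [hmap, pv_dedup_run w _ _
      (by intro k hk; obtain ⟨x, hx, rfl⟩ := List.mem_map.mp hk; exact hrun x hx)
      (by intro k hk; obtain ⟨x, hx, rfl⟩ := List.mem_map.mp hk; exact hrest x hx)]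
    rw [List.map_cons]
    refine congrArg₂ List.cons ?_ ?_
    · refine congrArg _ ?_
      have hfl : (l :: ls).filter (fun x => pvKey x == w) = l :: ls.takeWhile P := by
        rw [← hsplit, List.filter_cons, List.filter_append]
        have h1 : (pvKey l == w) = true := by simp [hwdef]
        have h2 : (ls.takeWhile P).filter (fun x => pvKey x == w) = ls.takeWhile P :=
          List.filter_eq_self.mpr (fun x hx => by simp [hrun x hx])
        have h3 : (ls.dropWhile P).filter (fun x => pvKey x == w) = [] :=
          List.filter_eq_nil_iff.mpr (fun x hx => by simp [hrest x hx])
        rw [h1, h2, h3]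
        simp [hsplit]
      rw [hfl, List.map_cons]
    · refine List.map_congr_left ?_
      intro k hk
      have hkmem : k ∈ (ls.dropWhile P).map pvKey := (PySem.List.mem_dedup _ _).mp hk
      obtain ⟨x0, hx0, rfl⟩ := List.mem_map.mp hkmem
      have hkne : pvKey x0 ≠ w := hrest x0 hx0
      refine congrArg _ ?_
      refine congrArg _ ?_
      rw [← hsplit, List.filter_cons, List.filter_append]
      have h1 : (pvKey l == pvKey x0) = false := by
        simpa [hwdef] using (Ne.symm hkne)
      have h2 : (ls.takeWhile P).filter (fun x => pvKey x == pvKey x0) = [] :=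
        List.filter_eq_nil_iff.mpr (fun x hx => by
          simp only [beq_iff_eq]
          rw [hrun x hx]; exact Ne.symm hkne)
      rw [h1, h2]
      simp

-- ===== VERDICT (by name: the statement is the Claim_ definition above) =====
theorem word_list_to_dict_spec : Claim_equal_word_list_to_dict := by
  intro list _ _
  unfold Spec_word_list_to_dict word_list_to_dict word_list_to_dict_alt
  rw [pv_fold_eq_canon, pv_groups_eq_canon _ (PySem.List.sorted_map_key_pairwise _ _)]
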